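-- pv_equiv track=rewrite | github.com/mstpn/Analysis-of-Root-Finding-Methods | charles_stepan_method.py | parse_degree_str
-- ===== SOURCE A (Python) =====
-- def parse_degree_str(poly_str):
--     split_by_degree = poly_str.split('x^')
--     degrees = [0]
--     for term in split_by_degree:
--         degree = 0
--         for ch in term:
--             if ch.isnumeric():
--                 degree = degree * 10 + int(ch)
--             else:
--                 break
--         degrees.append(degree)
--     return max(degrees)
-- ===== SOURCE B (Python) =====
-- def parse_degree_str(poly_str):
--     # Single left-to-right scan with two-character lookahead for 'x^':
--     # keeps a running max instead of splitting and building a list of degrees.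
--     best = 0
--     cur = 0
--     active = True  # currently reading the leading digit run of a term
--     i = 0
--     n = len(poly_str)
--     while i < n:
--         ch = poly_str[i]
--         if active and ch.isdigit():
--             cur = cur * 10 + (ord(ch) - 48)
--             i += 1
--         else:
--             if active and best < cur:
--                 best = cur
--             if ch == 'x' and i + 1 < n and poly_str[i + 1] == '^':
--                 cur, active = 0, True
--                 i += 2
--             else:
--                 cur, active = 0, False
--                 i += 1
--     if active and best < cur:
--         best = cur
--     return best
-- ===== Notes on version B (the rewrite author's own statement) =====
-- stated objective: alternative
-- what changed: Replaced split('x^') plus a nested per-term digit loop plus a materialized degrees list with max() by a single left-to-right character scan with two-character lookahead that keeps a running maximum and never builds intermediate lists.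
import Mathlib
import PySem

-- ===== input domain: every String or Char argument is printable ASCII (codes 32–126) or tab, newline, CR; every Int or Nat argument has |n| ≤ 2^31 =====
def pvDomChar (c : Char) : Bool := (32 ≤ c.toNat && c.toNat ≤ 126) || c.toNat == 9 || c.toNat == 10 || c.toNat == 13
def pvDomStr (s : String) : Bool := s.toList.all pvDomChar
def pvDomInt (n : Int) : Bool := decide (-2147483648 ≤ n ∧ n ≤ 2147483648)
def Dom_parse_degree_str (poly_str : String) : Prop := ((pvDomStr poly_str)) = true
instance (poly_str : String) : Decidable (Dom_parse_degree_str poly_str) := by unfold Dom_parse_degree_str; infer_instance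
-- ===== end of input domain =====

-- B replaces split('x^') + per-term digit loops + a materialized degrees list with one streaming
-- character scan (two-char lookahead, running maximum); same O(n) cost, no intermediate lists.


-- ===== PORT A =====
-- inner loop of A: read the leading digit run of a term (break on the first non-digit);
-- on the ASCII domain ch.isnumeric() is exactly isdigit and int(ch) is exactly toNat - 48
def pvLeadA : List Char → Int → Int
  | [], degree => degree
  | ch :: rest, degree =>
    if PySem.Chars.isdigit ch then pvLeadA rest (degree * 10 + ((ch.toNat : Int) - 48))
    else degree

def parse_degree_str (poly_str : String) : Int :=
  let split_by_degree := PySem.Chars.splitOn poly_str.toList ['x', '^']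
  let degrees := split_by_degree.foldl (fun acc term => acc ++ [pvLeadA term 0]) [(0 : Int)]
  -- max(degrees): degrees starts as [0], hence nonempty and max never raises
  (PySem.List.max? degrees (fun d => d)).getD 0

-- ===== PORT B =====
def pvVal (c : Char) : Int := (c.toNat : Int) - 48

-- the while loop of B: best, cur, active are the loop state; lookahead consumes 'x','^' at once
def pvScanB : List Char → Int → Int → Bool → Int
  | [], best, cur, active => if active then (if best < cur then cur else best) else best
  | c :: rest, best, cur, active =>
    if active && PySem.Chars.isdigit c then
      pvScanB rest best (cur * 10 + pvVal c) active
    else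
      let best' := if active then (if best < cur then cur else best) else best
      if c = 'x' ∧ rest.headI = '^' ∧ rest ≠ [] then pvScanB rest.tail best' 0 true
      else pvScanB rest best' 0 false
  termination_by l _ _ _ => l.length
  decreasing_by all_goals simp [List.length_tail]

def parse_degree_str_alt (poly_str : String) : Int :=
  pvScanB poly_str.toList 0 0 true

-- ===== PRECONDITION & SPEC =====
def Spec_parse_degree_str (poly_str : String) (out : Int) : Prop := out = parse_degree_str_alt poly_str
instance (poly_str : String) (out : Int) : Decidable (Spec_parse_degree_str poly_str out) := by unfold Spec_parse_degree_str; infer_instance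

-- ===== CLAIM (what is proved, stated in full; the proofs are below) =====
def Claim_equal_parse_degree_str : Prop := ∀ (poly_str : String), Dom_parse_degree_str poly_str → Spec_parse_degree_str poly_str (parse_degree_str poly_str)

-- ===== LEMMAS AND PROOFS =====

-- proof-side recursive model of splitOn l ['x','^']
def pvPieces : List Char → List (List Char)
  | [] => [[]]
  | 'x' :: '^' :: r => [] :: pvPieces r
  | c :: r =>
    match pvPieces r with
    | [] => [[c]]
    | h :: t => (c :: h) :: t

theorem pvPieces_ne_nil (l : List Char) : pvPieces l ≠ [] := by
  fun_induction pvPieces l <;> simp_all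

theorem pvPieces_cons_of_ne (c : Char) (r : List Char)
    (h : List.isPrefixOf ['x','^'] (c :: r) = false) :
    pvPieces (c :: r) = (match pvPieces r with | [] => [[c]] | hd :: t => (c :: hd) :: t) := by
  rw [pvPieces.eq_def]
  split
  · simp_all
  · rename_i heq; injection heq with h1 h2; subst h1; subst h2
    simp [List.isPrefixOf] at h
  · rename_i heq; injection heq with h1 h2; subst h1; subst h2; rfl

theorem prefix_true (c : Char) (r : List Char)
    (h : List.isPrefixOf ['x','^'] (c :: r) = true) :
    c = 'x' ∧ ∃ r', r = '^' :: r' := by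
  rcases r with _ | ⟨r0, r'⟩ <;> simp [List.isPrefixOf] at h
  obtain ⟨h1, h2⟩ := h
  exact ⟨by simp [h1.symm], r', by rw [← h2]⟩

def pvConsHead (p : List Char) : List (List Char) → List (List Char)
  | [] => [p]
  | h :: t => (p ++ h) :: t

theorem go_spec (fuel : Nat) (l cur : List Char) (acc : List (List Char)) (h : l.length < fuel) :
    PySem.Chars.splitOn.go ['x','^'] fuel l cur acc =
      acc.reverse ++ pvConsHead cur.reverse (pvPieces l) := by
  induction fuel generalizing l cur acc with
  | zero => omega
  | succ fuel ih =>
    match l with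
    | [] => simp [PySem.Chars.splitOn.go, pvPieces, pvConsHead]
    | c :: r =>
      cases hpre : List.isPrefixOf ['x','^'] (c :: r) with
      | true =>
        obtain ⟨rfl, r', rfl⟩ := prefix_true c r hpre
        rw [show PySem.Chars.splitOn.go ['x','^'] (fuel+1) ('x'::'^'::r') cur acc
              = PySem.Chars.splitOn.go ['x','^'] fuel r' [] (cur.reverse :: acc) from by
            simp [PySem.Chars.splitOn.go, List.isPrefixOf]]
        rw [ih r' [] (cur.reverse :: acc) (by simp at h ⊢; omega)]
        rcases hp : pvPieces r' with _ | ⟨ph, pt⟩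
        · exact absurd hp (pvPieces_ne_nil r')
        · simp [pvPieces, pvConsHead, hp]
      | false =>
        rw [show PySem.Chars.splitOn.go ['x','^'] (fuel+1) (c::r) cur acc
              = PySem.Chars.splitOn.go ['x','^'] fuel r (c :: cur) acc from by
            simp [PySem.Chars.splitOn.go, hpre]]
        rw [ih r (c :: cur) acc (by simp at h ⊢; omega)]
        rw [pvPieces_cons_of_ne c r hpre]
        rcases hp : pvPieces r with _ | ⟨ph, pt⟩
        · exact absurd hp (pvPieces_ne_nil r)
        · simp [pvConsHead]

theorem splitOn_eq_pvPieces (l : List Char) :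
    PySem.Chars.splitOn l ['x', '^'] = pvPieces l := by
  rw [PySem.Chars.splitOn, go_spec (l.length + 1) l [] [] (by omega)]
  rcases hp : pvPieces l with _ | ⟨ph, pt⟩
  · exact absurd hp (pvPieces_ne_nil l)
  · simp [pvConsHead]

theorem pvLeadA_head_pieces (l : List Char) (cur : Int) :
    pvLeadA ((pvPieces l).headI) cur = pvLeadA l cur := by
  induction l generalizing cur with
  | nil => simp [pvPieces]
  | cons c r ih =>
    cases hpre : List.isPrefixOf ['x','^'] (c :: r) with
    | true =>
      obtain ⟨rfl, r', rfl⟩ := prefix_true c r hpre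
      simp [pvPieces, pvLeadA, PySem.Chars.isdigit]
    | false =>
      rw [pvPieces_cons_of_ne c r hpre]
      rcases hp : pvPieces r with _ | ⟨ph, pt⟩
      · exact absurd hp (pvPieces_ne_nil r)
      · by_cases hd : PySem.Chars.isdigit c = true
        · simp only [List.headI, pvLeadA, hd, if_true]
          have := ih (cur * 10 + ((c.toNat : Int) - 48))
          rwa [hp] at this
        · simp [List.headI, pvLeadA, hd]

theorem pvLeadA_nonneg (l : List Char) (cur : Int) (h : 0 ≤ cur) : 0 ≤ pvLeadA l cur := by
  induction l generalizing cur with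
  | nil => simpa [pvLeadA]
  | cons c r ih =>
    by_cases hd : PySem.Chars.isdigit c = true
    · have hv : (0:Int) ≤ (c.toNat : Int) - 48 := by
        have h1 : ('0':Char) ≤ c ∧ c ≤ '9' := by simpa [PySem.Chars.isdigit] using hd
        have h2 : ('0':Char).toNat ≤ c.toNat := Char.le_def.mp h1.1
        have h3 : ('0':Char).toNat = 48 := by decide
        omega
      simp only [pvLeadA, hd, if_true]
      exact ih _ (by omega)
    · simpa [pvLeadA, hd]

theorem foldl_max_max (t : List Int) (a b : Int) :
    t.foldl max (max a b) = max a (t.foldl max b) := by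
  induction t generalizing b with
  | nil => simp
  | cons x t ih => simp [List.foldl, max_assoc, ih]

theorem if_lt_eq_max (a b : Int) : (if a < b then b else a) = max a b := by
  simp [max_def]; omega

theorem not_prefix_of_not_guard (c : Char) (r : List Char)
    (h : ¬(c = 'x' ∧ r.headI = '^' ∧ r ≠ [])) :
    List.isPrefixOf ['x','^'] (c :: r) = false := by
  cases hpre : List.isPrefixOf ['x','^'] (c :: r) with
  | false => rfl
  | true =>
    obtain ⟨rfl, r', rfl⟩ := prefix_true c r hpre
    exact absurd ⟨rfl, rfl, by simp⟩ h

theorem isdigit_x_false : PySem.Chars.isdigit 'x' = false := by decide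

theorem pvScanB_spec (n : Nat) : ∀ l : List Char, l.length ≤ n → ∀ best cur : Int, 0 ≤ best → 0 ≤ cur →
    pvScanB l best cur true
      = max best ((((pvPieces l).tail).map (fun p => pvLeadA p 0)).foldl max (pvLeadA l cur)) ∧
    pvScanB l best cur false
      = max best ((((pvPieces l).tail).map (fun p => pvLeadA p 0)).foldl max 0) := by
  induction n with
  | zero =>
    intro l hl best cur hb hc
    have : l = [] := by cases l <;> simp_all
    subst this
    simp [pvScanB, pvPieces, pvLeadA, if_lt_eq_max]
    omega
  | succ n ih =>
    intro l hl best cur hb hc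
    match l with
    | [] =>
      simp [pvScanB, pvPieces, pvLeadA, if_lt_eq_max]
      omega
    | c :: r =>
      have hlr : r.length ≤ n := by simp at hl; omega
      constructor
      · -- active
        by_cases hd : PySem.Chars.isdigit c = true
        · have hnp : List.isPrefixOf ['x','^'] (c :: r) = false := by
            cases hpre : List.isPrefixOf ['x','^'] (c :: r) with
            | false => rfl
            | true =>
              obtain ⟨rfl, -, -⟩ := prefix_true c r hpre
              simp [isdigit_x_false] at hd
          have hv : (0:Int) ≤ pvVal c := by
            have h1 : ('0':Char) ≤ c ∧ c ≤ '9' := by simpa [PySem.Chars.isdigit] using hd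
            have h2 : ('0':Char).toNat ≤ c.toNat := Char.le_def.mp h1.1
            have h3 : ('0':Char).toNat = 48 := by decide
            simp [pvVal]; omega
          rw [show pvScanB (c :: r) best cur true = pvScanB r best (cur * 10 + pvVal c) true from by
            simp [pvScanB, hd]]
          rw [(ih r hlr best (cur * 10 + pvVal c) hb (by omega)).1]
          rw [pvPieces_cons_of_ne c r hnp]
          rcases hp : pvPieces r with _ | ⟨ph, pt⟩
          · exact absurd hp (pvPieces_ne_nil r)
          · simp only [List.tail_cons]
            have : pvLeadA (c :: r) cur = pvLeadA r (cur * 10 + pvVal c) := by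
              simp [pvLeadA, hd, pvVal]
            rw [this]
        · by_cases hg : c = 'x' ∧ r.headI = '^' ∧ r ≠ []
          · obtain ⟨rfl, hh, hne⟩ := hg
            match r, hne with
            | r0 :: r2, _ =>
              simp only [List.headI] at hh
              subst hh
              rw [show pvScanB ('x' :: '^' :: r2) best cur true
                    = pvScanB r2 (if best < cur then cur else best) 0 true from by
                  simp [pvScanB, isdigit_x_false]]
              rw [(ih r2 (by simp at hl; omega) (if best < cur then cur else best) 0
                    (by rw [if_lt_eq_max]; exact le_max_of_le_left hb) le_rfl).1]
              rw [if_lt_eq_max]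
              have hpp : pvPieces ('x' :: '^' :: r2) = [] :: pvPieces r2 := by simp [pvPieces]
              rw [hpp]
              rcases hp : pvPieces r2 with _ | ⟨ph, pt⟩
              · exact absurd hp (pvPieces_ne_nil r2)
              · have hlead : pvLeadA ph 0 = pvLeadA r2 0 := by
                  have := pvLeadA_head_pieces r2 0
                  rwa [hp] at this
                have hcur : pvLeadA ('x' :: '^' :: r2) cur = cur := by
                  simp [pvLeadA, isdigit_x_false]
                simp only [List.tail_cons, List.map_cons, List.foldl_cons, hcur, hlead]
                rw [foldl_max_max, max_assoc]
          · rw [show pvScanB (c :: r) best cur true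
                  = pvScanB r (if best < cur then cur else best) 0 false from by
                rw [pvScanB.eq_def]; simp [hd, hg]]
            rw [(ih r hlr (if best < cur then cur else best) 0
                  (by rw [if_lt_eq_max]; exact le_max_of_le_left hb) le_rfl).2]
            rw [if_lt_eq_max]
            have hnp := not_prefix_of_not_guard c r hg
            rw [pvPieces_cons_of_ne c r hnp]
            rcases hp : pvPieces r with _ | ⟨ph, pt⟩
            · exact absurd hp (pvPieces_ne_nil r)
            · have hcur : pvLeadA (c :: r) cur = cur := by simp [pvLeadA, hd]
              simp only [List.tail_cons, hcur]
              have : (pt.map (fun p => pvLeadA p 0)).foldl max cur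
                  = max cur ((pt.map (fun p => pvLeadA p 0)).foldl max 0) := by
                rw [show cur = max cur 0 from by omega, foldl_max_max]
                omega
              rw [this, max_assoc]
      · -- inactive
        by_cases hg : c = 'x' ∧ r.headI = '^' ∧ r ≠ []
        · obtain ⟨rfl, hh, hne⟩ := hg
          match r, hne with
          | r0 :: r2, _ =>
            simp only [List.headI] at hh
            subst hh
            rw [show pvScanB ('x' :: '^' :: r2) best cur false
                  = pvScanB r2 best 0 true from by
                simp [pvScanB, isdigit_x_false]]
            rw [(ih r2 (by simp at hl; omega) best 0 hb le_rfl).1]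
            have hpp : pvPieces ('x' :: '^' :: r2) = [] :: pvPieces r2 := by simp [pvPieces]
            rw [hpp]
            rcases hp : pvPieces r2 with _ | ⟨ph, pt⟩
            · exact absurd hp (pvPieces_ne_nil r2)
            · have hlead : pvLeadA ph 0 = pvLeadA r2 0 := by
                have := pvLeadA_head_pieces r2 0
                rwa [hp] at this
              simp only [List.tail_cons, List.map_cons, List.foldl_cons, hlead]
              have h0 : max 0 (pvLeadA r2 0) = pvLeadA r2 0 :=
                max_eq_right (pvLeadA_nonneg r2 0 le_rfl)
              rw [h0]
        · rw [show pvScanB (c :: r) best cur false = pvScanB r best 0 false from by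
              rw [pvScanB.eq_def]; simp [hg]]
          rw [(ih r hlr best 0 hb le_rfl).2]
          have hnp := not_prefix_of_not_guard c r hg
          rw [pvPieces_cons_of_ne c r hnp]
          rcases hp : pvPieces r with _ | ⟨ph, pt⟩
          · exact absurd hp (pvPieces_ne_nil r)
          · simp only [List.tail_cons]

-- ===== VERDICT (by name: the statement is the Claim_ definition above) =====
theorem parse_degree_str_spec : Claim_equal_parse_degree_str := by
  intro s _
  unfold Spec_parse_degree_str
  show (PySem.List.max? (List.foldl (fun acc term => acc ++ [pvLeadA term 0]) [(0:Int)]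
          (PySem.Chars.splitOn s.toList [Char.ofNat 120, Char.ofNat 94])) (fun d => d)).getD 0
      = pvScanB s.toList 0 0 true
  rw [PySem.List.foldl_append_singleton_eq_map, splitOn_eq_pvPieces]
  simp only [List.singleton_append, PySem.List.max?_id_cons, Option.getD_some]
  rw [(pvScanB_spec s.toList.length s.toList le_rfl 0 0 le_rfl le_rfl).1]
  rcases hp : pvPieces s.toList with _ | ⟨ph, pt⟩
  · exact absurd hp (pvPieces_ne_nil _)
  · have hlead : pvLeadA ph 0 = pvLeadA s.toList 0 := by
      have := pvLeadA_head_pieces s.toList 0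
      rwa [hp] at this
    simp only [List.map_cons, List.foldl_cons, List.tail_cons, hlead]
    have h0 : max 0 (pvLeadA s.toList 0) = pvLeadA s.toList 0 :=
      max_eq_right (pvLeadA_nonneg _ 0 le_rfl)
    rw [h0]
    have hge : (0:Int) ≤ (pt.map (fun p => pvLeadA p 0)).foldl max (pvLeadA s.toList 0) :=
      le_trans (pvLeadA_nonneg _ 0 le_rfl) (PySem.List.le_foldl_max _ _).1
  
    omega
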